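-- pv_equiv track=rewrite | github.com/fangzhao2019/system_code-version3 | dataProcessMYD.py | countFeatureNumber
-- ===== SOURCE A (Python) =====
-- def countFeatureNumber(featureSet,commentVec):
--     featureCount2={}
--     for fea in featureSet.keys():
--         for vec in commentVec:
--             if fea==vec:
--                 if not fea in featureCount2.keys():
--                     featureCount2[fea]=0
--                 featureCount2[fea]+=1
--     featureCount1={}
--     for key in featureCount2.keys():
--         bigFea=featureSet[key]
--         if not bigFea in featureCount1.keys():
--             featureCount1[bigFea]=0
--         featureCount1[bigFea]+=featureCount2[key]
--     return featureCount1,featureCount2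
-- ===== SOURCE B (Python) =====
-- def countFeatureNumber(featureSet, commentVec):
--     # One pass over commentVec builds a count table; one pass over featureSet
--     # builds both result dicts, instead of A's nested scan per feature.
--     counts = {}
--     for vec in commentVec:
--         counts[vec] = counts.get(vec, 0) + 1
--     featureCount1 = {}
--     featureCount2 = {}
--     for fea, bigFea in featureSet.items():
--         c = counts.get(fea, 0)
--         if c != 0:
--             featureCount2[fea] = c
--             featureCount1[bigFea] = featureCount1.get(bigFea, 0) + c
--     return featureCount1, featureCount2
-- ===== Notes on version B (the rewrite author's own statement) =====
-- stated objective: faster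
-- what changed: B replaces A's nested scan of commentVec per feature key plus a second aggregation pass with one counting pass over commentVec and one pass over featureSet.items() that builds both result dicts simultaneously.
import Mathlib
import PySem

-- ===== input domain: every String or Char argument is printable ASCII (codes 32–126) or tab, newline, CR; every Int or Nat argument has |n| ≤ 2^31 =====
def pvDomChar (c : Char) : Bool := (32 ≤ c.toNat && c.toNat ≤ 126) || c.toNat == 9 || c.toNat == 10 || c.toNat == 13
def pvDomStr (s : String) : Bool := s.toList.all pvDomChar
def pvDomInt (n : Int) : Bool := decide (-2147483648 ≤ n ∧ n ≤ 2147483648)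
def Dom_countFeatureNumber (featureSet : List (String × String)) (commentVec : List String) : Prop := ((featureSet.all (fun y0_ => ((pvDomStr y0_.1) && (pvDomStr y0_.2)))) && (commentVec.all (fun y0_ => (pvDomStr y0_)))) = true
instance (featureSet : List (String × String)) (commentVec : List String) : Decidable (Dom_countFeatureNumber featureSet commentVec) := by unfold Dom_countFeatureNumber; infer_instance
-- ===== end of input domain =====

-- B replaces A's nested scan of commentVec per feature key (plus a second aggregation pass)
-- with one counting pass over commentVec and one pass over featureSet building both dicts; return values proved equal.

-- ===== PORT A =====
def countFeatureNumber (featureSet : List (String × String)) (commentVec : List String) : (List (String × Int)) × (List (String × Int)) :=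
  let fs : PySem.Dict String String := PySem.Dict.ofList featureSet
  let featureCount2 : PySem.Dict String Int :=
    fs.keys.foldl (fun fc2 fea =>
      commentVec.foldl (fun fc2 vec =>
        if fea == vec then
          (if fc2.contains fea then fc2 else fc2.insert fea 0).modify fea 0 (· + 1)
        else fc2) fc2) PySem.Dict.empty
  let featureCount1 : PySem.Dict String Int :=
    featureCount2.keys.foldl (fun fc1 key =>
      -- featureSet[key]: key comes from featureCount2 ⊆ featureSet's keys, so the lookup never raises; getD is exact here
      let bigFea := fs.getD key ""
      (if fc1.contains bigFea then fc1 else fc1.insert bigFea 0).modify bigFea 0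
        (· + featureCount2.getD key 0)) PySem.Dict.empty
  (featureCount1.items, featureCount2.items)

-- ===== PORT B =====
def countFeatureNumber_alt (featureSet : List (String × String)) (commentVec : List String) : (List (String × Int)) × (List (String × Int)) :=
  let fs : PySem.Dict String String := PySem.Dict.ofList featureSet
  let counts : PySem.Dict String Int :=
    commentVec.foldl (fun d v => d.insert v (d.getD v 0 + 1)) PySem.Dict.empty
  let p :=
    fs.items.foldl (fun (p : PySem.Dict String Int × PySem.Dict String Int) kv =>
      let c := counts.getD kv.1 0
      if c ≠ 0 then
        (p.1.insert kv.2 (p.1.getD kv.2 0 + c), p.2.insert kv.1 c)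
      else p) (PySem.Dict.empty, PySem.Dict.empty)
  (p.1.items, p.2.items)

-- ===== PRECONDITION & SPEC =====
def Spec_countFeatureNumber (featureSet : List (String × String)) (commentVec : List String) (out : (List (String × Int)) × (List (String × Int))) : Prop := out = countFeatureNumber_alt featureSet commentVec
instance (featureSet : List (String × String)) (commentVec : List String) (out : (List (String × Int)) × (List (String × Int))) : Decidable (Spec_countFeatureNumber featureSet commentVec out) := by unfold Spec_countFeatureNumber; infer_instance

-- ===== CLAIM (what is proved, stated in full; the proofs are below) =====
def Claim_equal_countFeatureNumber : Prop := ∀ (featureSet : List (String × String)) (commentVec : List String), Dom_countFeatureNumber featureSet commentVec → Spec_countFeatureNumber featureSet commentVec (countFeatureNumber featureSet commentVec)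

-- ===== LEMMAS AND PROOFS =====

-- Python's "if key not in d: d[key]=0 ; d[key]+=c" pattern is a single insert.
theorem pv_stepA (d : PySem.Dict String Int) (k : String) (c : Int) :
    (if d.contains k then d else d.insert k 0).modify k 0 (· + c) = d.insert k (d.getD k 0 + c) := by
  by_cases h : d.contains k
  · simp [h, PySem.Dict.modify]
  · have h' : d.contains k = false := by simpa using h
    simp [h', PySem.Dict.modify, PySem.Dict.insert_insert_self,
      PySem.Dict.getD_insert_self, PySem.Dict.getD_of_not_contains]

-- A's inner scan of commentVec for one feature key.
theorem pv_innerA (fea : String) (cv : List String) : ∀ d : PySem.Dict String Int,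
    cv.foldl (fun fc2 vec => if fea == vec then
        (if fc2.contains fea then fc2 else fc2.insert fea 0).modify fea 0 (· + 1) else fc2) d
    = if cv.count fea = 0 then d else d.insert fea (d.getD fea 0 + (cv.count fea : Int)) := by
  induction cv with
  | nil => intro d; simp
  | cons x t ih =>
    intro d
    by_cases hx : fea = x
    · subst hx
      rw [List.foldl_cons, if_pos (by simp), pv_stepA, ih]
      have hc : (fea :: t).count fea = t.count fea + 1 := by simp
      by_cases h0 : t.count fea = 0
      · simp [h0, hc]
      · rw [if_neg h0, if_neg (by omega : ¬ (fea :: t).count fea = 0),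
          PySem.Dict.getD_insert_self, PySem.Dict.insert_insert_self, hc]
        congr 1
        push_cast
        ring
    · have hbx : (fea == x) = false := by simpa using hx
      rw [List.foldl_cons, if_neg (by simp [hbx]), ih]
      have hxb' : (x == fea) = false := by
        simpa using fun h : x = fea => hx h.symm
      have : (x :: t).count fea = t.count fea := by
        simp [List.count_cons, hxb']
      rw [this]

theorem pv_build {α : Type} (cv : List String) (key : α → String) :
    ∀ (l : List α) (d : PySem.Dict String Int),
      d.keys.Nodup → (l.map key).Nodup → (∀ a ∈ l, d.contains (key a) = false) →
      (l.foldl (fun d a => if cv.count (key a) = 0 then d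
          else d.insert (key a) (d.getD (key a) 0 + (cv.count (key a) : Int))) d).items
        = d.items ++ l.filterMap (fun a => if cv.count (key a) = 0 then none
            else some (key a, (cv.count (key a) : Int))) := by
  intro l
  induction l with
  | nil => intro d _ _ _; simp
  | cons a t ih =>
    intro d hnd hnl hfresh
    rw [List.map_cons, List.nodup_cons] at hnl
    obtain ⟨hka, htl⟩ := hnl
    have hfa : d.contains (key a) = false := hfresh a (by simp)
    rw [List.foldl_cons]
    by_cases h0 : cv.count (key a) = 0
    · rw [if_pos h0]
      rw [ih d hnd htl (fun b hb => hfresh b (by simp [hb]))]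
      simp [h0]
    · rw [if_neg h0]
      have hgd : d.getD (key a) 0 = 0 := PySem.Dict.getD_of_not_contains d 0 hfa
      set d' := d.insert (key a) (d.getD (key a) 0 + (cv.count (key a) : Int)) with hd'
      have hnd' : d'.keys.Nodup := PySem.Dict.nodup_keys_insert d _ _ hnd
      have hfresh' : ∀ b ∈ t, d'.contains (key b) = false := by
        intro b hb
        have hne : key b ≠ key a := by
          intro he
          exact hka (List.mem_map.mpr ⟨b, hb, he⟩)
        rw [hd', PySem.Dict.contains_insert]
        simp [hne, hfresh b (by simp [hb])]
      rw [ih d' hnd' htl hfresh']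
      rw [hd', PySem.Dict.items_insert_of_not_contains d _ hfa]
      simp [h0, hgd]

-- pv_build specialised to a plain key list (A folds over featureSet's keys directly)
theorem pv_buildA (cv : List String) (l : List String) (d : PySem.Dict String Int)
    (h1 : d.keys.Nodup) (h2 : l.Nodup) (h3 : ∀ a ∈ l, d.contains a = false) :
    (l.foldl (fun d a => if cv.count a = 0 then d
        else d.insert a (d.getD a 0 + (cv.count a : Int))) d).items
      = d.items ++ l.filterMap (fun a => if cv.count a = 0 then none
          else some (a, (cv.count a : Int))) := by
  have := pv_build cv (fun s => s) l d h1 (by simpa) h3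
  simpa using this

theorem pv_filterMap_if' {α β : Type} (p : α → Prop) [DecidablePred p] (f : α → β) (l : List α) :
    l.filterMap (fun a => if p a then none else some (f a))
      = (l.filter (fun a => !decide (p a))).map f := by
  induction l with
  | nil => rfl
  | cons a t ih => by_cases h : p a <;> simp [h, ih]

-- the two ports agree on every input
theorem pv_main (featureSet : List (String × String)) (commentVec : List String) :
    countFeatureNumber featureSet commentVec = countFeatureNumber_alt featureSet commentVec := by
  classical
  simp only [countFeatureNumber, countFeatureNumber_alt]
  set F := PySem.Dict.ofList featureSet with hF
  have hndk : F.keys.Nodup := PySem.Dict.nodup_keys_ofList featureSet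
  have hkeys : F.keys = F.items.map Prod.fst := rfl
  have hndps : (F.items.map Prod.fst).Nodup := hkeys ▸ hndk
  set ps := F.items with hps
  set psF := ps.filter (fun kv => !decide (commentVec.count kv.1 = 0)) with hpsF
  have hndpsF : (psF.map Prod.fst).Nodup :=
    List.Nodup.sublist (List.Sublist.map Prod.fst List.filter_sublist) hndps
  set f2 := psF.map (fun kv => (kv.1, (commentVec.count kv.1 : Int))) with hf2
  -- A's first phase builds exactly the dict with items f2
  have hA2 : (F.keys.foldl (fun fc2 fea =>
      commentVec.foldl (fun fc2 vec => if fea == vec then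
        (if fc2.contains fea then fc2 else fc2.insert fea 0).modify fea 0 (· + 1)
      else fc2) fc2) PySem.Dict.empty) = PySem.Dict.mk f2 := by
    apply PySem.Dict.ext
    rw [PySem.List.foldl_congr_mem _ _
      (fun d fea => if commentVec.count fea = 0 then d
        else d.insert fea (d.getD fea 0 + (commentVec.count fea : Int))) _
      (fun acc x _ => pv_innerA x commentVec acc)]
    rw [pv_buildA commentVec F.keys PySem.Dict.empty (by simp) hndk (fun a _ => by simp)]
    rw [hkeys, List.filterMap_map]
    have := pv_filterMap_if' (fun kv : String × String => commentVec.count kv.1 = 0)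
      (fun kv => (kv.1, (commentVec.count kv.1 : Int))) ps
    simpa using this
  have hndf2 : (PySem.Dict.mk f2).keys.Nodup := by
    have : (PySem.Dict.mk f2).keys = psF.map Prod.fst := by
      simp [hf2, List.map_map, Function.comp_def, PySem.Dict.keys]
    rw [this]; exact hndpsF
  have hget2 : ∀ kv ∈ psF, (PySem.Dict.mk f2).getD kv.1 0 = (commentVec.count kv.1 : Int) := by
    intro kv hkv
    have hm : (kv.1, (commentVec.count kv.1 : Int)) ∈ f2 := by
      rw [hf2]
      exact List.mem_map.mpr ⟨kv, hkv, rfl⟩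
    exact PySem.Dict.getD_of_mem_items _ hm hndf2 0
  have hgetF : ∀ kv ∈ psF, F.getD kv.1 "" = kv.2 := by
    intro kv hkv
    exact PySem.Dict.getD_of_mem_items F (List.mem_of_mem_filter hkv) hndk ""
  -- A's second phase is the canonical fold over psF
  have hA1 : ((PySem.Dict.mk f2).keys.foldl (fun fc1 key =>
      (if fc1.contains (F.getD key "") then fc1 else fc1.insert (F.getD key "") 0).modify
        (F.getD key "") 0 (· + (PySem.Dict.mk f2).getD key 0)) PySem.Dict.empty)
      = psF.foldl (fun d kv => d.insert kv.2 (d.getD kv.2 0 + (commentVec.count kv.1 : Int)))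
          PySem.Dict.empty := by
    rw [PySem.List.foldl_congr_mem _ _
      (fun fc1 key => fc1.insert (F.getD key "")
        (fc1.getD (F.getD key "") 0 + (PySem.Dict.mk f2).getD key 0)) _
      (fun acc x _ => pv_stepA acc _ _)]
    have hk2 : (PySem.Dict.mk f2).keys = psF.map Prod.fst := by
      simp [hf2, List.map_map, Function.comp_def, PySem.Dict.keys]
    rw [hk2, List.foldl_map]
    apply PySem.List.foldl_congr_mem
    intro acc kv hkv
    rw [hgetF kv hkv, hget2 kv hkv]
  rw [hA2, hA1]
  -- B's single pass is two independent folds over the keys that occur in commentVec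
  rw [PySem.List.foldl_congr_mem ps _
    (fun (p : PySem.Dict String Int × PySem.Dict String Int) kv =>
      (if commentVec.count kv.1 ≠ 0 then
          p.1.insert kv.2 (p.1.getD kv.2 0 + (commentVec.count kv.1 : Int)) else p.1,
       if commentVec.count kv.1 ≠ 0 then
          p.2.insert kv.1 (commentVec.count kv.1 : Int) else p.2))
    (PySem.Dict.empty, PySem.Dict.empty)
    (by
      intro acc kv _
      rw [PySem.Dict.getD_foldl_insert_add_one]
      by_cases hc : commentVec.count kv.1 = 0 <;> simp [hc])]
  rw [PySem.List.foldl_prod_mk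
    (f := fun (d : PySem.Dict String Int) (kv : String × String) =>
      if commentVec.count kv.1 ≠ 0 then
        d.insert kv.2 (d.getD kv.2 0 + (commentVec.count kv.1 : Int)) else d)
    (g := fun (d : PySem.Dict String Int) (kv : String × String) =>
      if commentVec.count kv.1 ≠ 0 then d.insert kv.1 (commentVec.count kv.1 : Int) else d)]
  have hfilter : ps.filter (fun kv => decide (commentVec.count kv.1 ≠ 0)) = psF := by
    apply List.filter_congr
    intro kv _
    simp
  rw [PySem.List.foldl_ite_eq_foldl_filter
      (fun kv : String × String => commentVec.count kv.1 ≠ 0)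
      (fun (d : PySem.Dict String Int) kv =>
        d.insert kv.2 (d.getD kv.2 0 + (commentVec.count kv.1 : Int))) ps PySem.Dict.empty,
    PySem.List.foldl_ite_eq_foldl_filter
      (fun kv : String × String => commentVec.count kv.1 ≠ 0)
      (fun (d : PySem.Dict String Int) kv =>
        d.insert kv.1 (commentVec.count kv.1 : Int)) ps PySem.Dict.empty,
    hfilter]
  have hB2i : (List.foldl (fun (d : PySem.Dict String Int) (kv : String × String) =>
      d.insert kv.1 (commentVec.count kv.1 : Int)) PySem.Dict.empty psF).items = f2 := by
    rw [PySem.Dict.items_foldl_insert_fresh psF Prod.fst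
      (fun kv => (commentVec.count kv.1 : Int)) PySem.Dict.empty (fun a _ => by simp) hndpsF]
    simp [hf2, PySem.Dict.empty]
  exact Prod.ext rfl hB2i.symm

-- ===== VERDICT (by name: the statement is the Claim_ definition above) =====
theorem countFeatureNumber_spec : Claim_equal_countFeatureNumber := by
  intro featureSet commentVec _
  unfold Spec_countFeatureNumber
  exact pv_main featureSet commentVec
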